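-- pv_equiv track=rewrite | github.com/cthiounn/adventofcode-2023-python | day12.py | check_valid_springs_config
-- ===== SOURCE A (Python) =====
-- def check_valid_springs_config(springs, numbers):
--     if "?" in springs:
--         return False
--     numbers_checked=(list(map(lambda x: x.count("#"),springs.split("."))))
--     new_numbers_checked=list()
--     for number in numbers_checked:
--         if number !=0:
--             new_numbers_checked.append(number)
--     return new_numbers_checked==numbers
-- ===== SOURCE B (Python) =====
-- def check_valid_springs_config(springs, numbers):
--     if "?" in springs:
--         return False
--     result = []
--     run = 0
--     for ch in springs:
--         if ch == '.':
--             if run: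
--                 result.append(run)
--             run = 0
--         elif ch == '#':
--             run += 1
--     if run:
--         result.append(run)
--     return result == numbers
-- ===== Notes on version B (the rewrite author's own statement) =====
-- stated objective: simpler
-- what changed: Replaces split('.')+per-segment count('#')+filter with a single left-to-right scan that accumulates '#'-run lengths directly into the result list.
import Mathlib
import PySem

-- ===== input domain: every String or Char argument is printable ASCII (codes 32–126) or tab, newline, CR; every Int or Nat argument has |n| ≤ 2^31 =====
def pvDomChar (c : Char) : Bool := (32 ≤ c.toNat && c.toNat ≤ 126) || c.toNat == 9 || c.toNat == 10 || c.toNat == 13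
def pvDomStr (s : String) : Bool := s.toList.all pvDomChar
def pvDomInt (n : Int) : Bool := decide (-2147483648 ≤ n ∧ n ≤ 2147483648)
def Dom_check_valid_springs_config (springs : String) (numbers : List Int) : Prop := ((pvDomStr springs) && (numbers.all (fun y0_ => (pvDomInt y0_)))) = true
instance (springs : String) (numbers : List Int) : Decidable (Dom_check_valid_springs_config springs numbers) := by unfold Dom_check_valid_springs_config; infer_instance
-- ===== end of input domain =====

-- B replaces split('.')/count('#')/filter with one scan that builds the run-length list directly (objective: simpler).

-- ===== PORT A =====
-- springs.split(".") with the nonempty literal separator "." is PySem.Chars.splitOn on the code points (exact).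
def check_valid_springs_config (springs : String) (numbers : List Int) : Bool :=
  if PySem.Str.isIn "?" springs then false
  else
    let numbers_checked : List Int :=
      (PySem.Chars.splitOn springs.toList ['.']).map (fun x => (PySem.Chars.count x ['#'] : Int))
    let new_numbers_checked : List Int :=
      numbers_checked.foldl (fun acc number => if number ≠ 0 then acc ++ [number] else acc) []
    new_numbers_checked == numbers

-- ===== PORT B =====
-- one step of B's scan: '.' flushes the current run, '#' extends it, anything else is skipped
def stepB (st : Int × List Int) (ch : Char) : Int × List Int :=
  if ch = '.' then (0, if st.1 ≠ 0 then st.2 ++ [st.1] else st.2)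
  else if ch = '#' then (st.1 + 1, st.2)
  else st

-- the trailing 'if run: result.append(run)'
def finB (st : Int × List Int) : List Int := if st.1 ≠ 0 then st.2 ++ [st.1] else st.2

def check_valid_springs_config_alt (springs : String) (numbers : List Int) : Bool :=
  if PySem.Str.isIn "?" springs then false
  else
    finB (springs.toList.foldl stepB ((0 : Int), ([] : List Int))) == numbers

-- ===== PRECONDITION & SPEC =====
def Spec_check_valid_springs_config (springs : String) (numbers : List Int) (out : Bool) : Prop := out = check_valid_springs_config_alt springs numbers
instance (springs : String) (numbers : List Int) (out : Bool) : Decidable (Spec_check_valid_springs_config springs numbers out) := by unfold Spec_check_valid_springs_config; infer_instance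

-- ===== CLAIM (what is proved, stated in full; the proofs are below) =====
def Claim_equal_check_valid_springs_config : Prop := ∀ (springs : String) (numbers : List Int), Dom_check_valid_springs_config springs numbers → Spec_check_valid_springs_config springs numbers (check_valid_springs_config springs numbers)

-- ===== LEMMAS AND PROOFS =====

-- Reference splitter: Python's split(".") on a char list, with the pending (reversed) segment cur.
def splitSpecDot : List Char → List Char → List (List Char)
  | [], cur => [cur.reverse]
  | d :: rest, cur => if d = '.' then cur.reverse :: splitSpecDot rest [] else splitSpecDot rest (d :: cur)

theorem countGo_hash (l : List Char) : ∀ (fuel acc : Nat), l.length ≤ fuel →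
    PySem.Chars.count.go ['#'] fuel l acc = acc + l.count '#' := by
  induction l with
  | nil => intro fuel acc _; cases fuel <;> simp [PySem.Chars.count.go]
  | cons d rest ih =>
    intro fuel acc h
    cases fuel with
    | zero => simp at h
    | succ f =>
      simp only [PySem.Chars.count.go]
      by_cases hd : d = '#'
      · subst hd
        simp only [List.isPrefixOf, Bool.and_true, beq_self_eq_true, if_pos,
          List.length_cons, List.length_nil, List.drop_succ_cons, List.drop_zero]
        rw [ih f (acc + 1) (by simpa using h)]
        simp
        omega
      · have hpf : List.isPrefixOf ['#'] (d :: rest) = false := by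
          simp [List.isPrefixOf]; exact fun h' => (hd h'.symm).elim
        rw [hpf]
        simp only [Bool.false_eq_true, if_false]
        rw [ih f acc (by simpa using h)]
        simp [hd]

theorem count_hash (l : List Char) : (PySem.Chars.count l ['#'] : Int) = (l.count '#' : Int) := by
  simp only [PySem.Chars.count, List.isEmpty_cons, Bool.false_eq_true, if_false]
  rw [countGo_hash l l.length 0 le_rfl]
  simp

theorem splitGo_dot (l : List Char) : ∀ (fuel : Nat) (cur : List Char) (acc : List (List Char)),
    l.length ≤ fuel →
    PySem.Chars.splitOn.go ['.'] fuel l cur acc = acc.reverse ++ splitSpecDot l cur := by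
  induction l with
  | nil => intro fuel cur acc _; cases fuel <;> simp [PySem.Chars.splitOn.go, splitSpecDot]
  | cons d rest ih =>
    intro fuel cur acc h
    cases fuel with
    | zero => simp at h
    | succ f =>
      simp only [PySem.Chars.splitOn.go]
      by_cases hd : d = '.'
      · subst hd
        simp only [List.isPrefixOf, Bool.and_true, beq_self_eq_true, if_pos,
          List.length_cons, List.length_nil, List.drop_succ_cons, List.drop_zero]
        rw [ih f [] (cur.reverse :: acc) (by simpa using h)]
        simp [splitSpecDot]
      · have hpf : List.isPrefixOf ['.'] (d :: rest) = false := by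
          simp [List.isPrefixOf]; exact fun h' => (hd h'.symm).elim
        rw [hpf]
        simp only [Bool.false_eq_true, if_false]
        rw [ih f (d :: cur) acc (by simpa using h)]
        simp [splitSpecDot, hd]

theorem splitOn_dot (l : List Char) :
    PySem.Chars.splitOn l ['.'] = splitSpecDot l [] := by
  simpa using splitGo_dot l (l.length + 1) [] [] (by omega)

-- A's filter loop is List.filter (via PySem.List.foldl_append_if with f = id)
theorem foldA_filter (l : List Int) :
    l.foldl (fun acc number => if number ≠ 0 then acc ++ [number] else acc) []
      = l.filter (fun n => n ≠ 0) := by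
  induction l using List.reverseRecOn with
  | nil => simp
  | append_singleton xs x ih =>
      simp only [List.foldl_append, List.foldl_cons, List.foldl_nil, List.filter_append, ih]
      by_cases h : x = 0 <;> simp [h, List.filter]

-- B's scan, related to the segment view of A: run = '#'-count of the pending segment cur
theorem scan_spec (l : List Char) : ∀ (run : Int) (cur : List Char) (accI : List Int),
    run = ((cur.count '#' : Nat) : Int) →
    finB (l.foldl stepB (run, accI))
      = accI ++ ((splitSpecDot l cur).map (fun seg => ((seg.count '#' : Nat) : Int))).filter
          (fun n => n ≠ 0) := by
  induction l with
  | nil =>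
    intro run cur accI hrun
    subst hrun
    by_cases h : cur.count '#' = 0 <;>
      simp [finB, splitSpecDot, List.filter, h]
  | cons d rest ih =>
    intro run cur accI hrun
    subst hrun
    by_cases hd : d = '.'
    · subst hd
      have hstep : stepB (((cur.count '#' : Nat) : Int), accI) '.'
          = (0, if ((cur.count '#' : Nat) : Int) ≠ 0 then accI ++ [((cur.count '#' : Nat) : Int)] else accI) := by
        simp [stepB]
      rw [List.foldl_cons, hstep, ih 0 [] _ (by simp)]
      by_cases h : cur.count '#' = 0 <;>
        simp [splitSpecDot, h, List.count_reverse]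
    · by_cases hh : d = '#'
      · subst hh
        have hstep : stepB (((cur.count '#' : Nat) : Int), accI) '#'
            = (((('#' :: cur).count '#' : Nat) : Int), accI) := by
          simp [stepB]
        rw [List.foldl_cons, hstep, ih _ ('#' :: cur) accI rfl]
        simp [splitSpecDot, hd]
      · have hstep : stepB (((cur.count '#' : Nat) : Int), accI) d
            = ((((d :: cur).count '#' : Nat) : Int), accI) := by
          simp [stepB, hd, hh]
        rw [List.foldl_cons, hstep, ih _ (d :: cur) accI rfl]
        simp [splitSpecDot, hd]

-- ===== VERDICT (by name: the statement is the Claim_ definition above) =====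
theorem check_valid_springs_config_spec : Claim_equal_check_valid_springs_config := by
  intro springs numbers _
  unfold Spec_check_valid_springs_config
  unfold check_valid_springs_config check_valid_springs_config_alt
  by_cases hq : PySem.Str.isIn "?" springs = true
  · rw [if_pos hq, if_pos hq]
  · rw [if_neg hq, if_neg hq]
    have hscan := scan_spec springs.toList 0 [] [] (by simp)
    simp only [List.nil_append] at hscan
    simp only [hscan, splitOn_dot, count_hash, foldA_filter]
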